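-- pv_equiv track=rewrite | github.com/hamdyaea/GNU-Coreutils-Python | chmod.py | parse_symbolic_mode
-- ===== SOURCE A (Python) =====
-- import stat
--
-- def parse_symbolic_mode(permission_str, current_mode):
--     """Parse et applique les permissions symboliques spécifiées."""
--     user_map = {
--         'u': stat.S_IRUSR | stat.S_IWUSR | stat.S_IXUSR,
--         'g': stat.S_IRGRP | stat.S_IWGRP | stat.S_IXGRP,
--         'o': stat.S_IROTH | stat.S_IWOTH | stat.S_IXOTH,
--         'a': (stat.S_IRUSR | stat.S_IWUSR | stat.S_IXUSR |
--               stat.S_IRGRP | stat.S_IWGRP | stat.S_IXGRP |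
--               stat.S_IROTH | stat.S_IWOTH | stat.S_IXOTH)
--     }
--     perm_map = {'r': stat.S_IRUSR | stat.S_IRGRP | stat.S_IROTH,
--                 'w': stat.S_IWUSR | stat.S_IWGRP | stat.S_IWOTH,
--                 'x': stat.S_IXUSR | stat.S_IXGRP | stat.S_IXOTH}
--
--     operation = None
--     users = 0
--     permissions = 0
--
--     for char in permission_str:
--         if char in user_map:
--             users |= user_map[char]
--         elif char in '+-=':
--             operation = char
--         elif char in perm_map:
--             permissions |= perm_map[char]
--         elif char == ',':
--             # Applique les changements pour chaque segment séparé par des virgules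
--             current_mode = update_mode(current_mode, users, permissions, operation)
--             users, permissions, operation = 0, 0, None
--
--     # Applique le dernier segment
--     if operation:
--         current_mode = update_mode(current_mode, users, permissions, operation)
--
--     return current_mode
--
-- def update_mode(current_mode, users, permissions, operation):
--     """Met à jour les permissions en fonction de l'opération (+, -, =) spécifiée."""
--     if operation == '+':
--         current_mode |= (users & permissions)
--     elif operation == '-':
--         current_mode &= ~(users & permissions)
--     elif operation == '=':
--         current_mode &= ~users  # Réinitialise les permissions pour les utilisateurs spécifiés
--         current_mode |= (users & permissions)
--     return current_mode
-- ===== SOURCE B (Python) =====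
-- _UMAP = {'u': 0o700, 'g': 0o070, 'o': 0o007, 'a': 0o777}
-- _PMAP = {'r': 0o444, 'w': 0o222, 'x': 0o111}
--
-- def _last_op(segment):
--     """The operation in effect for a clause: its last '+', '-' or '=' character."""
--     for c in reversed(segment):
--         if c in '+-=':
--             return c
--     return None
--
-- def _segment_transform(segment):
--     """Compile one comma-separated clause into a bit transform (keep, setbits):
--     applying the clause to a mode m yields (m & keep) | setbits."""
--     users = ((_UMAP['u'] if 'u' in segment else 0)
--              | (_UMAP['g'] if 'g' in segment else 0)
--              | (_UMAP['o'] if 'o' in segment else 0)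
--              | (_UMAP['a'] if 'a' in segment else 0))
--     perms = ((_PMAP['r'] if 'r' in segment else 0)
--              | (_PMAP['w'] if 'w' in segment else 0)
--              | (_PMAP['x'] if 'x' in segment else 0))
--     op = _last_op(segment)
--     if op == '+':
--         return -1, users & perms
--     if op == '-':
--         return ~(users & perms), 0
--     if op == '=':
--         return ~users, users & perms
--     return -1, 0
--
-- def parse_symbolic_mode(permission_str, current_mode):
--     # Compile the whole mode string into one transform (keep, setbits) by composing
--     # the clause transforms, then apply it to current_mode in a single step.
--     keep, setbits = -1, 0
--     for segment in permission_str.split(','):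
--         k, s = _segment_transform(segment)
--         keep, setbits = keep & k, (setbits & k) | s
--     return (current_mode & keep) | setbits
-- ===== Notes on version B (the rewrite author's own statement) =====
-- stated objective: alternative
-- what changed: B compiles each comma-separated clause into a bitwise affine transform (keep, setbits) using substring-membership tests for the masks and a reverse scan for the effective operator, composes the transforms algebraically, and applies the single composed transform to current_mode once, instead of A's flat per-character loop threading the mode through per-segment updates.
import Mathlib
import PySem

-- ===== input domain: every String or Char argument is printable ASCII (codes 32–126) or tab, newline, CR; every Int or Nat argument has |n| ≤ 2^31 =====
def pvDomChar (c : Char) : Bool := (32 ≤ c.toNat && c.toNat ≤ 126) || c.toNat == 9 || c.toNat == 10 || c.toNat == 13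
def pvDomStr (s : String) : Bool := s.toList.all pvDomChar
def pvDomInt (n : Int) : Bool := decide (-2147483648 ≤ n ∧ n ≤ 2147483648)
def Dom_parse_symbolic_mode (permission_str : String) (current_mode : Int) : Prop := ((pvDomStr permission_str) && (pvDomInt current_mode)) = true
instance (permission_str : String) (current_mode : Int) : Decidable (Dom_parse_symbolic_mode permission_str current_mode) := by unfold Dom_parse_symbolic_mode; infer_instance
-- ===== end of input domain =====

-- B compiles each comma clause into a (keep, setbits) bit transform, composes the transforms,
-- and applies the composed transform to current_mode once; A threads the mode through a flat
-- character loop. Same O(n) asymptotics, a genuinely different (algebraic) algorithm; a timing run measured B faster by a constant factor (C-level membership tests vs a per-character Python loop).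


-- ===== PORT A =====
-- constants: 'u'=0o700=448, 'g'=0o70=56, 'o'=0o7=7, 'a'=0o777=511; 'r'=0o444=292, 'w'=0o222=146, 'x'=0o111=73
def pvIsUser (c : Char) : Bool := c = 'u' || c = 'g' || c = 'o' || c = 'a'
def pvUserVal (c : Char) : Int :=
  if c = 'u' then 448 else if c = 'g' then 56 else if c = 'o' then 7 else 511
def pvIsPerm (c : Char) : Bool := c = 'r' || c = 'w' || c = 'x'
def pvPermVal (c : Char) : Int := if c = 'r' then 292 else if c = 'w' then 146 else 73

-- helper update_mode of A; operation None ↦ no change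
def update_mode (current_mode users permissions : Int) (operation : Option Char) : Int :=
  if operation = some '+' then PySem.Int.bor current_mode (PySem.Int.band users permissions)
  else if operation = some '-' then PySem.Int.band current_mode (Int.not (PySem.Int.band users permissions))
  else if operation = some '=' then PySem.Int.bor (PySem.Int.band current_mode (Int.not users)) (PySem.Int.band users permissions)
  else current_mode

-- one iteration of A's for-loop; state = (current_mode, users, permissions, operation)
def pvStepA (st : Int × Int × Int × Option Char) (c : Char) : Int × Int × Int × Option Char :=
  let (m, u, p, op) := st
  if pvIsUser c then (m, PySem.Int.bor u (pvUserVal c), p, op)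
  else if c = '+' || c = '-' || c = '=' then (m, u, p, some c)
  else if pvIsPerm c then (m, u, PySem.Int.bor p (pvPermVal c), op)
  else if c = ',' then (update_mode m u p op, 0, 0, none)
  else (m, u, p, op)

def parse_symbolic_mode (permission_str : String) (current_mode : Int) : Int :=
  let (m, u, p, op) := permission_str.toList.foldl pvStepA (current_mode, 0, 0, none)
  if op.isSome then update_mode m u p op else m

-- ===== PORT B =====
-- hand port of Python's str.split(','), exact for a single-character separator
def pvSplitComma : List Char → List (List Char)
  | [] => [[]]
  | c :: cs =>
    if c = ',' then [] :: pvSplitComma cs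
    else match pvSplitComma cs with
      | [] => [[c]]
      | s :: rest => (c :: s) :: rest

-- B's _last_op: first operator of the reversed clause
def pvFindOpFwd : List Char → Option Char
  | [] => none
  | c :: cs => if c = '+' || c = '-' || c = '=' then some c else pvFindOpFwd cs

def pvLastOp (seg : List Char) : Option Char := pvFindOpFwd seg.reverse

-- B's membership-based mask expressions
def pvUsersOf (seg : List Char) : Int :=
  PySem.Int.bor (PySem.Int.bor (PySem.Int.bor
    (if seg.contains 'u' then 448 else 0)
    (if seg.contains 'g' then 56 else 0))
    (if seg.contains 'o' then 7 else 0))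
    (if seg.contains 'a' then 511 else 0)

def pvPermsOf (seg : List Char) : Int :=
  PySem.Int.bor (PySem.Int.bor
    (if seg.contains 'r' then 292 else 0)
    (if seg.contains 'w' then 146 else 0))
    (if seg.contains 'x' then 73 else 0)

-- B's _segment_transform: the clause as a (keep, setbits) transform
def pvSegTransform (seg : List Char) : Int × Int :=
  let users := pvUsersOf seg
  let perms := pvPermsOf seg
  let op := pvLastOp seg
  if op = some '+' then (-1, PySem.Int.band users perms)
  else if op = some '-' then (Int.not (PySem.Int.band users perms), 0)
  else if op = some '=' then (Int.not users, PySem.Int.band users perms)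
  else (-1, 0)

-- composition of transforms, B's loop body
def pvCompose (ks : Int × Int) (seg : List Char) : Int × Int :=
  let t := pvSegTransform seg
  (PySem.Int.band ks.1 t.1, PySem.Int.bor (PySem.Int.band ks.2 t.1) t.2)

def parse_symbolic_mode_alt (permission_str : String) (current_mode : Int) : Int :=
  let ks := (pvSplitComma permission_str.toList).foldl pvCompose (-1, 0)
  PySem.Int.bor (PySem.Int.band current_mode ks.1) ks.2

-- ===== PRECONDITION & SPEC =====
def Spec_parse_symbolic_mode (permission_str : String) (current_mode : Int) (out : Int) : Prop := out = parse_symbolic_mode_alt permission_str current_mode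
instance (permission_str : String) (current_mode : Int) (out : Int) : Decidable (Spec_parse_symbolic_mode permission_str current_mode out) := by unfold Spec_parse_symbolic_mode; infer_instance

-- ===== CLAIM =====
def Claim_equal_parse_symbolic_mode : Prop := ∀ (permission_str : String) (current_mode : Int), Dom_parse_symbolic_mode permission_str current_mode → Spec_parse_symbolic_mode permission_str current_mode (parse_symbolic_mode permission_str current_mode)

-- ===== LEMMAS AND PROOFS =====

-- bitwise foundation: PySem's band/bor agree with Mathlib's land/lor, testBit extensionality

theorem pvNat_and_add_ldiff (m : Nat) : ∀ n : Nat, (m &&& n) + m.ldiff n = m := by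
  induction m using Nat.binaryRec with
  | zero =>
    intro n
    have h0 : Nat.ldiff 0 n = 0 := Nat.eq_of_testBit_eq (fun k => by simp [Nat.testBit_ldiff])
    simp [h0]
  | bit b m ih =>
    intro n
    rw [show n = Nat.bit (n.testBit 0) (n >>> 1) from (Nat.bit_testBit_zero_shiftRight_one n).symm]
    rw [Nat.land_bit, Nat.ldiff_bit]
    simp only [Nat.bit_val]
    have := ih (n >>> 1)
    cases b <;> cases n.testBit 0 <;> simp <;> omega

theorem pvNat_ldiff_eq (m n : Nat) : m.ldiff n = m - (m &&& n) := by
  have := pvNat_and_add_ldiff m n; omega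

theorem pvBand_eq_land (a b : Int) : PySem.Int.band a b = Int.land a b := by
  unfold PySem.Int.band
  rcases a with m | m <;> rcases b with n | n <;>
    simp [Int.land, Int.toNat, Int.negSucc_eq, pvNat_ldiff_eq] <;> omega

theorem pvBor_eq_lor (a b : Int) : PySem.Int.bor a b = Int.lor a b := by
  unfold PySem.Int.bor
  rcases a with m | m <;> rcases b with n | n <;>
    simp [Int.lor, Int.toNat, Int.negSucc_eq, pvNat_ldiff_eq] <;> omega

theorem pvIntExt {a b : Int} (h : ∀ k, a.testBit k = b.testBit k) : a = b := by
  have big : ∀ x y : Nat, x < 2 ^ (x + y) := fun x y =>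
    lt_of_lt_of_le (Nat.lt_two_pow_self) (Nat.pow_le_pow_right (by norm_num) (Nat.le_add_right _ _))
  rcases a with m | m <;> rcases b with n | n
  · exact congrArg _ (Nat.eq_of_testBit_eq fun k => h k)
  · exfalso
    have hk := h (m + n)
    simp [Int.testBit, Nat.testBit_lt_two_pow (big m n),
      Nat.testBit_lt_two_pow (by simpa [Nat.add_comm] using big n m : n < 2 ^ (m + n))] at hk
  · exfalso
    have hk := h (m + n)
    simp [Int.testBit, Nat.testBit_lt_two_pow (big m n),
      Nat.testBit_lt_two_pow (by simpa [Nat.add_comm] using big n m : n < 2 ^ (m + n))] at hk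
  · have : m = n := Nat.eq_of_testBit_eq fun k => by
      have hk := h k; simpa [Int.testBit] using hk
    simp [this]

-- derived bitwise identities (B = PySem.Int.bor, A = PySem.Int.band below)
theorem pvBor_assoc (a b c : Int) :
    PySem.Int.bor (PySem.Int.bor a b) c = PySem.Int.bor a (PySem.Int.bor b c) := by
  apply pvIntExt; intro k
  simp [pvBor_eq_lor, Int.testBit_lor, Bool.or_assoc]


theorem pvZero_bor (a : Int) : PySem.Int.bor 0 a = a := by
  rw [PySem.Int.bor_comm, PySem.Int.bor_zero]


theorem pvComposeOk (m k1 s1 k2 s2 : Int) :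
    PySem.Int.bor (PySem.Int.band (PySem.Int.bor (PySem.Int.band m k1) s1) k2) s2 =
    PySem.Int.bor (PySem.Int.band m (PySem.Int.band k1 k2)) (PySem.Int.bor (PySem.Int.band s1 k2) s2) := by
  apply pvIntExt; intro k
  simp only [pvBor_eq_lor, pvBand_eq_land, Int.testBit_lor, Int.testBit_land]
  cases m.testBit k <;> cases k1.testBit k <;> cases s1.testBit k <;> cases k2.testBit k <;> simp

theorem pvApply_neg_one_zero (m : Int) :
    PySem.Int.bor (PySem.Int.band m (-1)) 0 = m := by
  rw [PySem.Int.band_neg_one, PySem.Int.bor_zero]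

-- A in tail-recursive form, reduced to a per-segment fold (pvSegFold)
def pvStepSeg (st : Int × Int × Option Char) (c : Char) : Int × Int × Option Char :=
  let (u, p, op) := st
  if pvIsUser c then (PySem.Int.bor u (pvUserVal c), p, op)
  else if c = '+' || c = '-' || c = '=' then (u, p, some c)
  else if pvIsPerm c then (u, PySem.Int.bor p (pvPermVal c), op)
  else (u, p, op)

def pvApply (mode users permissions : Int) (operation : Option Char) : Int :=
  if operation = some '+' then PySem.Int.bor mode (PySem.Int.band users permissions)
  else if operation = some '-' then PySem.Int.band mode (Int.not (PySem.Int.band users permissions))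
  else if operation = some '=' then PySem.Int.bor (PySem.Int.band mode (Int.not users)) (PySem.Int.band users permissions)
  else mode

def pvSegFold (mode : Int) (seg : List Char) : Int :=
  let (u, p, op) := seg.foldl pvStepSeg (0, 0, none)
  pvApply mode u p op

def pvGoA : (Int × Int × Int × Option Char) → List Char → Int
  | (m, u, p, op), [] => if op.isSome then update_mode m u p op else m
  | st, c :: cs => pvGoA (pvStepA st c) cs

def pvContB (cs : List Char) (m u p : Int) (op : Option Char) : Int :=
  match pvSplitComma cs with
  | [] => m
  | seg :: rest =>
    let (u', p', op') := seg.foldl pvStepSeg (u, p, op)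
    rest.foldl pvSegFold (pvApply m u' p' op')

theorem pvGoA_eq_foldl (cs : List Char) (st : Int × Int × Int × Option Char) :
    pvGoA st cs = (let (m, u, p, op) := cs.foldl pvStepA st; if op.isSome then update_mode m u p op else m) := by
  induction cs generalizing st with
  | nil => obtain ⟨m, u, p, op⟩ := st; rfl
  | cons c cs ih => simpa [pvGoA, List.foldl] using ih (pvStepA st c)

theorem pvApply_finish (m u p : Int) (op : Option Char) :
    pvApply m u p op = if op.isSome then update_mode m u p op else m := by
  cases op <;> simp [pvApply, update_mode]

theorem pvApply_eq_update (m u p : Int) (op : Option Char) :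
    pvApply m u p op = update_mode m u p op := by
  cases op <;> simp [pvApply, update_mode]

theorem pvSplitComma_ne_nil (cs : List Char) : pvSplitComma cs ≠ [] := by
  cases cs with
  | nil => simp [pvSplitComma]
  | cons c cs =>
    simp only [pvSplitComma]
    split
    · simp
    · cases h : pvSplitComma cs <;> simp

theorem pvStepA_not_comma (m u p : Int) (op : Option Char) (c : Char) (h : c ≠ ',') :
    pvStepA (m, u, p, op) c = (m, pvStepSeg (u, p, op) c) := by
  simp only [pvStepA, pvStepSeg]
  split_ifs <;> simp_all

theorem pvGoA_eq_contB (cs : List Char) (m u p : Int) (op : Option Char) :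
    pvGoA (m, u, p, op) cs = pvContB cs m u p op := by
  induction cs generalizing m u p op with
  | nil =>
    simp [pvGoA, pvContB, pvSplitComma, pvApply_finish]
  | cons c cs ih =>
    by_cases hc : c = ','
    · subst hc
      have h1 : pvStepA (m, u, p, op) ',' = (update_mode m u p op, 0, 0, none) := by
        simp [pvStepA, pvIsUser, pvIsPerm]
      rw [pvGoA, h1, ih]
      cases h : pvSplitComma cs with
      | nil => exact absurd h (pvSplitComma_ne_nil cs)
      | cons seg rest =>
        simp [pvContB, pvSplitComma, h, pvSegFold, pvApply_eq_update]
    · rw [pvGoA, pvStepA_not_comma m u p op c hc, ih]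
      simp only [pvContB, pvSplitComma, if_neg hc]
      cases h : pvSplitComma cs with
      | nil => exact absurd h (pvSplitComma_ne_nil cs)
      | cons seg rest =>
        simp [List.foldl_cons]

theorem pvA_eq_segs (s : String) (m : Int) :
    parse_symbolic_mode s m = (pvSplitComma s.toList).foldl pvSegFold m := by
  have h := (pvGoA_eq_foldl s.toList (m, 0, 0, none)).symm.trans (pvGoA_eq_contB s.toList m 0 0 none)
  unfold parse_symbolic_mode
  rw [h]
  unfold pvContB
  cases hsp : pvSplitComma s.toList with
  | nil => exact absurd hsp (pvSplitComma_ne_nil _)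
  | cons seg rest => simp [List.foldl_cons, pvSegFold]

-- characterisation of a segment's fold in terms of B's masks and last operator
def pvUMask (c : Char) : Int :=
  if c = 'u' then 448 else if c = 'g' then 56 else if c = 'o' then 7 else if c = 'a' then 511 else 0

def pvPMask (c : Char) : Int :=
  if c = 'r' then 292 else if c = 'w' then 146 else if c = 'x' then 73 else 0

def pvOpc (c : Char) : Option Char := if c = '+' || c = '-' || c = '=' then some c else none

theorem pvTestBit_zero (k : Nat) : (0 : Int).testBit k = false := by
  simp [Int.testBit]

theorem pvP1 (wb : Bool) (v b c d : Int) :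
    PySem.Int.bor v (PySem.Int.bor (PySem.Int.bor (PySem.Int.bor (if wb then v else 0) b) c) d) =
      PySem.Int.bor (PySem.Int.bor (PySem.Int.bor v b) c) d := by
  apply pvIntExt
  intro k
  cases wb
  · simp [pvBor_eq_lor, Int.testBit_lor, pvTestBit_zero, Bool.or_assoc, Bool.or_comm, Bool.or_left_comm]
  · simp only [if_true, pvBor_eq_lor, Int.testBit_lor]
    cases v.testBit k <;> cases b.testBit k <;> cases c.testBit k <;> cases d.testBit k <;> simp

theorem pvP2 (wb : Bool) (v a c d : Int) :
    PySem.Int.bor v (PySem.Int.bor (PySem.Int.bor (PySem.Int.bor a (if wb then v else 0)) c) d) =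
      PySem.Int.bor (PySem.Int.bor (PySem.Int.bor a v) c) d := by
  apply pvIntExt
  intro k
  cases wb
  · simp [pvBor_eq_lor, Int.testBit_lor, pvTestBit_zero, Bool.or_assoc, Bool.or_comm, Bool.or_left_comm]
  · simp only [if_true, pvBor_eq_lor, Int.testBit_lor]
    cases v.testBit k <;> cases a.testBit k <;> cases c.testBit k <;> cases d.testBit k <;> simp

theorem pvP3 (wb : Bool) (v a b d : Int) :
    PySem.Int.bor v (PySem.Int.bor (PySem.Int.bor (PySem.Int.bor a b) (if wb then v else 0)) d) =
      PySem.Int.bor (PySem.Int.bor (PySem.Int.bor a b) v) d := by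
  apply pvIntExt
  intro k
  cases wb
  · simp [pvBor_eq_lor, Int.testBit_lor, pvTestBit_zero, Bool.or_assoc, Bool.or_comm, Bool.or_left_comm]
  · simp only [if_true, pvBor_eq_lor, Int.testBit_lor]
    cases v.testBit k <;> cases a.testBit k <;> cases b.testBit k <;> cases d.testBit k <;> simp

theorem pvP4 (wb : Bool) (v a b c : Int) :
    PySem.Int.bor v (PySem.Int.bor (PySem.Int.bor (PySem.Int.bor a b) c) (if wb then v else 0)) =
      PySem.Int.bor (PySem.Int.bor (PySem.Int.bor a b) c) v := by
  apply pvIntExt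
  intro k
  cases wb
  · simp [pvBor_eq_lor, Int.testBit_lor, pvTestBit_zero, Bool.or_assoc, Bool.or_comm, Bool.or_left_comm]
  · simp only [if_true, pvBor_eq_lor, Int.testBit_lor]
    cases v.testBit k <;> cases a.testBit k <;> cases b.testBit k <;> cases c.testBit k <;> simp

theorem pvQ1 (wb : Bool) (v b c : Int) :
    PySem.Int.bor v (PySem.Int.bor (PySem.Int.bor (if wb then v else 0) b) c) =
      PySem.Int.bor (PySem.Int.bor v b) c := by
  apply pvIntExt
  intro k
  cases wb
  · simp [pvBor_eq_lor, Int.testBit_lor, pvTestBit_zero, Bool.or_assoc, Bool.or_comm, Bool.or_left_comm]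
  · simp only [if_true, pvBor_eq_lor, Int.testBit_lor]
    cases v.testBit k <;> cases b.testBit k <;> cases c.testBit k <;> simp

theorem pvQ2 (wb : Bool) (v a c : Int) :
    PySem.Int.bor v (PySem.Int.bor (PySem.Int.bor a (if wb then v else 0)) c) =
      PySem.Int.bor (PySem.Int.bor a v) c := by
  apply pvIntExt
  intro k
  cases wb
  · simp [pvBor_eq_lor, Int.testBit_lor, pvTestBit_zero, Bool.or_assoc, Bool.or_comm, Bool.or_left_comm]
  · simp only [if_true, pvBor_eq_lor, Int.testBit_lor]
    cases v.testBit k <;> cases a.testBit k <;> cases c.testBit k <;> simp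

theorem pvQ3 (wb : Bool) (v a b : Int) :
    PySem.Int.bor v (PySem.Int.bor (PySem.Int.bor a b) (if wb then v else 0)) =
      PySem.Int.bor (PySem.Int.bor a b) v := by
  apply pvIntExt
  intro k
  cases wb
  · simp [pvBor_eq_lor, Int.testBit_lor, pvTestBit_zero, Bool.or_assoc, Bool.or_comm, Bool.or_left_comm]
  · simp only [if_true, pvBor_eq_lor, Int.testBit_lor]
    cases v.testBit k <;> cases a.testBit k <;> cases b.testBit k <;> simp

theorem pvOr_assoc (a b c : Option Char) : (a.or b).or c = a.or (b.or c) := by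
  cases a <;> cases b <;> rfl

theorem pvOr_none (o : Option Char) : o.or none = o := by
  cases o <;> rfl

theorem pvStepSeg_eq (u p : Int) (op : Option Char) (c : Char) :
    pvStepSeg (u, p, op) c = (PySem.Int.bor u (pvUMask c), PySem.Int.bor p (pvPMask c), (pvOpc c).or op) := by
  by_cases h1 : c = 'u'; · subst h1; simp [pvStepSeg, pvIsUser, pvUserVal, pvUMask, pvPMask, pvOpc, Option.or]
  by_cases h2 : c = 'g'; · subst h2; simp [pvStepSeg, pvIsUser, pvUserVal, pvUMask, pvPMask, pvOpc, Option.or]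
  by_cases h3 : c = 'o'; · subst h3; simp [pvStepSeg, pvIsUser, pvUserVal, pvUMask, pvPMask, pvOpc, Option.or]
  by_cases h4 : c = 'a'; · subst h4; simp [pvStepSeg, pvIsUser, pvUserVal, pvUMask, pvPMask, pvOpc, Option.or]
  by_cases h5 : c = '+'; · subst h5; simp [pvStepSeg, pvIsUser, pvIsPerm, pvUMask, pvPMask, pvOpc, Option.or]
  by_cases h6 : c = '-'; · subst h6; simp [pvStepSeg, pvIsUser, pvIsPerm, pvUMask, pvPMask, pvOpc, Option.or]
  by_cases h7 : c = '='; · subst h7; simp [pvStepSeg, pvIsUser, pvIsPerm, pvUMask, pvPMask, pvOpc, Option.or]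
  by_cases h8 : c = 'r'; · subst h8; simp [pvStepSeg, pvIsUser, pvIsPerm, pvPermVal, pvUMask, pvPMask, pvOpc, Option.or]
  by_cases h9 : c = 'w'; · subst h9; simp [pvStepSeg, pvIsUser, pvIsPerm, pvPermVal, pvUMask, pvPMask, pvOpc, Option.or]
  by_cases h10 : c = 'x'; · subst h10; simp [pvStepSeg, pvIsUser, pvIsPerm, pvPermVal, pvUMask, pvPMask, pvOpc, Option.or]
  simp [pvStepSeg, pvIsUser, pvIsPerm, pvUMask, pvPMask, pvOpc, Option.or,
    h1, h2, h3, h4, h5, h6, h7, h8, h9, h10]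

theorem pvFindOpFwd_append (l1 l2 : List Char) :
    pvFindOpFwd (l1 ++ l2) = (pvFindOpFwd l1).or (pvFindOpFwd l2) := by
  induction l1 with
  | nil => simp [pvFindOpFwd]
  | cons c cs ih =>
    simp only [List.cons_append, pvFindOpFwd]
    split_ifs <;> simp [ih, Option.or]

theorem pvLastOp_cons (c : Char) (cs : List Char) :
    pvLastOp (c :: cs) = (pvLastOp cs).or (pvOpc c) := by
  simp only [pvLastOp, List.reverse_cons, pvFindOpFwd_append]
  rfl

theorem pvUsersOf_cons (c : Char) (cs : List Char) :
    pvUsersOf (c :: cs) = PySem.Int.bor (pvUMask c) (pvUsersOf cs) := by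
  by_cases h1 : c = 'u'
  · subst h1
    simp only [pvUsersOf, List.contains_cons, pvUMask, if_pos rfl]
    simp only [show ('u' == 'u') = true from rfl, show ('g' == 'u') = false from rfl,
      show ('o' == 'u') = false from rfl, show ('a' == 'u') = false from rfl,
      Bool.true_or, Bool.false_or, if_true]
    exact (pvP1 (cs.contains 'u') 448 _ _ _).symm
  by_cases h2 : c = 'g'
  · subst h2
    simp only [pvUsersOf, List.contains_cons, pvUMask]
    simp only [show ('u' == 'g') = false from rfl, show ('g' == 'g') = true from rfl,
      show ('o' == 'g') = false from rfl, show ('a' == 'g') = false from rfl,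
      show ¬(('g' : Char) = 'u') from by decide,
      Bool.true_or, Bool.false_or, if_true, if_pos rfl, if_neg (by decide : ¬(('g' : Char) = 'u'))]
    exact (pvP2 (cs.contains 'g') 56 _ _ _).symm
  by_cases h3 : c = 'o'
  · subst h3
    simp only [pvUsersOf, List.contains_cons, pvUMask]
    simp only [show ('u' == 'o') = false from rfl, show ('g' == 'o') = false from rfl,
      show ('o' == 'o') = true from rfl, show ('a' == 'o') = false from rfl,
      Bool.true_or, Bool.false_or, if_true,
      if_neg (by decide : ¬(('o' : Char) = 'u')), if_neg (by decide : ¬(('o' : Char) = 'g')),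
      if_pos rfl]
    exact (pvP3 (cs.contains 'o') 7 _ _ _).symm
  by_cases h4 : c = 'a'
  · subst h4
    simp only [pvUsersOf, List.contains_cons, pvUMask]
    simp only [show ('u' == 'a') = false from rfl, show ('g' == 'a') = false from rfl,
      show ('o' == 'a') = false from rfl, show ('a' == 'a') = true from rfl,
      Bool.true_or, Bool.false_or, if_true,
      if_neg (by decide : ¬(('a' : Char) = 'u')), if_neg (by decide : ¬(('a' : Char) = 'g')),
      if_neg (by decide : ¬(('a' : Char) = 'o')), if_pos rfl]
    exact (pvP4 (cs.contains 'a') 511 _ _ _).symm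
  · have e1 : ('u' == c) = false := by simp [Ne.symm h1]
    have e2 : ('g' == c) = false := by simp [Ne.symm h2]
    have e3 : ('o' == c) = false := by simp [Ne.symm h3]
    have e4 : ('a' == c) = false := by simp [Ne.symm h4]
    simp only [pvUsersOf, List.contains_cons, pvUMask, e1, e2, e3, e4, Bool.false_or,
      if_neg h1, if_neg h2, if_neg h3, if_neg h4]
    exact (pvZero_bor _).symm

theorem pvPermsOf_cons (c : Char) (cs : List Char) :
    pvPermsOf (c :: cs) = PySem.Int.bor (pvPMask c) (pvPermsOf cs) := by
  by_cases h1 : c = 'r'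
  · subst h1
    simp only [pvPermsOf, List.contains_cons, pvPMask]
    simp only [show ('r' == 'r') = true from rfl, show ('w' == 'r') = false from rfl,
      show ('x' == 'r') = false from rfl, Bool.true_or, Bool.false_or, if_true, if_pos rfl]
    exact (pvQ1 (cs.contains 'r') 292 _ _).symm
  by_cases h2 : c = 'w'
  · subst h2
    simp only [pvPermsOf, List.contains_cons, pvPMask]
    simp only [show ('r' == 'w') = false from rfl, show ('w' == 'w') = true from rfl,
      show ('x' == 'w') = false from rfl, Bool.true_or, Bool.false_or, if_true,
      if_neg (by decide : ¬(('w' : Char) = 'r')), if_pos rfl]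
    exact (pvQ2 (cs.contains 'w') 146 _ _).symm
  by_cases h3 : c = 'x'
  · subst h3
    simp only [pvPermsOf, List.contains_cons, pvPMask]
    simp only [show ('r' == 'x') = false from rfl, show ('w' == 'x') = false from rfl,
      show ('x' == 'x') = true from rfl, Bool.true_or, Bool.false_or, if_true,
      if_neg (by decide : ¬(('x' : Char) = 'r')), if_neg (by decide : ¬(('x' : Char) = 'w')),
      if_pos rfl]
    exact (pvQ3 (cs.contains 'x') 73 _ _).symm
  · have e1 : ('r' == c) = false := by simp [Ne.symm h1]
    have e2 : ('w' == c) = false := by simp [Ne.symm h2]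
    have e3 : ('x' == c) = false := by simp [Ne.symm h3]
    simp only [pvPermsOf, List.contains_cons, pvPMask, e1, e2, e3, Bool.false_or,
      if_neg h1, if_neg h2, if_neg h3]
    exact (pvZero_bor _).symm

theorem pvSegChar (seg : List Char) : ∀ (u p : Int) (op : Option Char),
    seg.foldl pvStepSeg (u, p, op) =
      (PySem.Int.bor u (pvUsersOf seg), PySem.Int.bor p (pvPermsOf seg), (pvLastOp seg).or op) := by
  induction seg with
  | nil =>
    intro u p op
    have hU : pvUsersOf [] = 0 := by decide
    have hP : pvPermsOf [] = 0 := by decide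
    simp [List.foldl_nil, hU, hP, pvLastOp, pvFindOpFwd, PySem.Int.bor_zero, Option.or]
  | cons c cs ih =>
    intro u p op
    rw [List.foldl_cons, pvStepSeg_eq, ih, pvUsersOf_cons, pvPermsOf_cons, pvLastOp_cons]
    refine Prod.ext ?_ (Prod.ext ?_ ?_) <;> simp [pvBor_assoc, pvOr_assoc]

-- the per-segment fold is exactly the segment's transform
theorem pvSegFold_transform (m : Int) (seg : List Char) :
    pvSegFold m seg = PySem.Int.bor (PySem.Int.band m (pvSegTransform seg).1) (pvSegTransform seg).2 := by
  unfold pvSegFold pvSegTransform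
  rw [pvSegChar]
  simp only [pvZero_bor, pvOr_none]
  unfold pvApply
  split_ifs <;> simp [PySem.Int.band_neg_one, PySem.Int.bor_zero]

-- the composed transform applied once equals folding the segments through the mode
theorem pvMain (segs : List (List Char)) : ∀ (k s m : Int),
    PySem.Int.bor (PySem.Int.band m (segs.foldl pvCompose (k, s)).1) (segs.foldl pvCompose (k, s)).2 =
      segs.foldl pvSegFold (PySem.Int.bor (PySem.Int.band m k) s) := by
  induction segs with
  | nil => intro k s m; rfl
  | cons seg rest ih =>
    intro k s m
    rw [List.foldl_cons, List.foldl_cons, pvSegFold_transform, pvComposeOk]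
    exact ih _ _ m

-- ===== VERDICT =====
theorem parse_symbolic_mode_spec : Claim_equal_parse_symbolic_mode := by
  intro s m _
  show parse_symbolic_mode s m = parse_symbolic_mode_alt s m
  rw [pvA_eq_segs]
  unfold parse_symbolic_mode_alt
  rw [pvMain, pvApply_neg_one_zero]
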